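-- pv_equiv track=rewrite | github.com/sebnson/ps | programmers/lv1/82612.py | solution
-- ===== SOURCE A (Python) =====
-- def solution(price, money, count):
--     priceSum = 0
--     for i in range(count+1):
--         priceSum += price * i
--     result = priceSum - money
--
--     if result >= 0:
--         return result
--     else:
--         return 0
-- ===== SOURCE B (Python) =====
-- def solution(price, money, count):
--     total = price * (count * (count + 1) // 2) if count >= 0 else 0
--     return max(total - money, 0)
-- ===== Notes on version B (the rewrite author's own statement) =====
-- stated objective: faster
-- what changed: Replaced the O(count) accumulation loop by the closed-form triangular-number formula price*count*(count+1)//2 and an if/else return by max(..., 0).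
import Mathlib
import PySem

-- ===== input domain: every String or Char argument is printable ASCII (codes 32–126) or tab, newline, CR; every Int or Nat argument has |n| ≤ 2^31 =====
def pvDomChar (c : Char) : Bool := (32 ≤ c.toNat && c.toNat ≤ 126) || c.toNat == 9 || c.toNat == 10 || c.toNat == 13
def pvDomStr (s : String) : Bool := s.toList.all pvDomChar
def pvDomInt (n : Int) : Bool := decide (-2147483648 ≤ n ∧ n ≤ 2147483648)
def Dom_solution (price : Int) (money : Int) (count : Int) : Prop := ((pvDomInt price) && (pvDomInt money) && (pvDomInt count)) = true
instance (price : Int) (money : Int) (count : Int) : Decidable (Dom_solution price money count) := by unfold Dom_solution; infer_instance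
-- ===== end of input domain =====

-- B replaces A's O(count) accumulation loop by the closed-form triangular sum (objective: faster, asymptotic).

-- ===== PORT A =====
def solution (price : Int) (money : Int) (count : Int) : Int :=
  let priceSum := (PySem.List.pyRange 0 (count + 1) 1).foldl (fun s i => s + price * i) 0
  let result := priceSum - money
  if result ≥ 0 then result else 0

-- ===== PORT B =====
def solution_alt (price : Int) (money : Int) (count : Int) : Int :=
  let total := if count ≥ 0 then price * (PySem.Int.floordiv (count * (count + 1)) 2) else 0
  max (total - money) 0

-- ===== PRECONDITION & SPEC =====
def Spec_solution (price : Int) (money : Int) (count : Int) (out : Int) : Prop := out = solution_alt price money count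
instance (price : Int) (money : Int) (count : Int) (out : Int) : Decidable (Spec_solution price money count out) := by unfold Spec_solution; infer_instance

-- ===== CLAIM (what is proved, stated in full; the proofs are below) =====
def Claim_equal_solution : Prop := ∀ (price : Int) (money : Int) (count : Int), Dom_solution price money count → Spec_solution price money count (solution price money count)

-- ===== LEMMAS AND PROOFS =====

-- A's loop over range(n) sums to price * (Gauss sum of 0..n-1)
theorem pv_foldl_sum (price : Int) (n : Nat) :
    (PySem.List.pyRange 0 (n : Int) 1).foldl (fun s i => s + price * i) 0
      = price * ((Finset.range n).sum (fun i => (i : Int))) := by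
  induction n with
  | zero => simp [PySem.List.pyRange_one_eq_nil]
  | succ n ih =>
    have h : (PySem.List.pyRange 0 ((n + 1 : Nat) : Int) 1)
        = PySem.List.pyRange 0 (n : Int) 1 ++ [(n : Int)] := by
      have := PySem.List.pyRange_one_succ_right (a := 0) (b := (n : Int)) (by positivity)
      simpa using this
    rw [h, List.foldl_append, ih, Finset.sum_range_succ]
    simp
    ring

theorem solution_spec : Claim_equal_solution := by
  intro price money count _
  unfold Spec_solution solution solution_alt
  by_cases hc : count ≥ 0
  · -- nonnegative count: both are price * triangular − money, clipped at 0
    obtain ⟨c, rfl⟩ := Int.eq_ofNat_of_zero_le hc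
    have hsum : (PySem.List.pyRange 0 ((c : Int) + 1) 1).foldl (fun s i => s + price * i) 0
        = price * ((Finset.range (c + 1)).sum (fun i => (i : Int))) := by
      have := pv_foldl_sum price (c + 1)
      simpa using this
    have hgauss : ((Finset.range (c + 1)).sum (fun i => (i : Int)))
        = ((c * (c + 1) / 2 : Nat) : Int) := by
      rw [← Nat.cast_sum]
      congr 1
      rw [Finset.sum_range_id, Nat.add_sub_cancel, Nat.mul_comm]
    have hfd : PySem.Int.floordiv ((c : Int) * ((c : Int) + 1)) 2 = ((c * (c + 1) / 2 : Nat) : Int) := by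
      have : ((c : Int) * ((c : Int) + 1)) = ((c * (c + 1) : Nat) : Int) := by push_cast; ring
      rw [this]
      exact_mod_cast PySem.Int.floordiv_natCast (c * (c + 1)) 2
    simp only [hsum, hgauss, hc, if_pos, hfd]
    omega
  · -- negative count: empty range on A's side, 0 on B's side
    have h : PySem.List.pyRange 0 (count + 1) 1 = [] :=
      PySem.List.pyRange_one_eq_nil (by omega)
    simp only [h, List.foldl_nil, if_neg hc]
    omega
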